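-- pv_equiv track=rewrite | github.com/pytorch/pytorch | memory_allocator/profile_mine.py | greedy_by_longest_and_size_with_smallest_gap
-- ===== SOURCE A (Python) =====
-- def intersect(xs, ys):
--     return max(xs[1], ys[1]) - min(xs[0], ys[0]) - (xs[1] - xs[0]) - (ys[1] - ys[0])
--
-- def intersect_lvr(xs, ys):
--     return intersect(xs, ys) <= 0
--
-- def find_smallest_gap(record, ordered_allocs):
--     (begin_t, end_t), size_t = record
--     best_gap = float("inf")
--     best_offset = None
--     prev_offset = 0
--
--     for (begin_x, end_x), (offset_x, size_x) in ordered_allocs: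
--         if not intersect_lvr((begin_x, end_x), (begin_t, end_t)):
--             continue
--
--         # offset_x will be ahead of the previous block
--         # while prev_offset will be just in front
--         # this looks for small gap ahead of a block
--         gap = offset_x - prev_offset
--         if size_t <= gap < best_gap:
--             best_gap = gap
--             best_offset = prev_offset
--
--         prev_offset = max(prev_offset, offset_x + size_x)
--
--     if best_offset is None:
--         best_offset = prev_offset
--     return best_offset
--
-- def greedy_by_longest_and_size_with_smallest_gap(ordered_records):
--     ordered_records.sort(key=lambda x: (x[0][1] - x[0][0]), reverse=True)
--     ordered_allocs = []
--     inorder_of_decision_allocs = []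
--     total_consumption = 0
--     for record in ordered_records:
--         best_offset = find_smallest_gap(record, ordered_allocs)
--
--         (begin_t, end_t), size_t = record
--         total_consumption = max(total_consumption, best_offset + size_t)
--
--         ordered_allocs.append(((begin_t, end_t), (best_offset, size_t)))
--         inorder_of_decision_allocs.append(((begin_t, end_t), (best_offset, size_t)))
--         ordered_allocs.sort(key=lambda x: x[1][0])
--
--     return inorder_of_decision_allocs, total_consumption
-- ===== SOURCE B (Python) =====
-- # B: divide-and-conquer placement. Each record's offset is found by recursively splitting the
-- # offset-sorted live blocks, combining (stack top, best fitting (gap, offset) candidate)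
-- # summaries from the two halves, instead of A's linear sweep with running prev/best over a
-- # persistently re-sorted allocation list.  Like A, it sorts ordered_records in place
-- # (equivalence is about the return value).
--
-- def merge_cand(c1, c2):
--     if c1 is None:
--         return c2
--     if c2 is None:
--         return c1
--     return c2 if c2 < c1 else c1
--
-- def place(live, base, size_t):
--     # live: blocks (offset, size) sorted by offset; returns (top of stack after
--     # these blocks, best fitting (gap, offset) candidate or None)
--     if not live:
--         return base, None
--     if len(live) == 1:
--         o, s = live[0]
--         gap = o - base
--         return max(base, o + s), ((gap, o) if size_t <= gap else None)
--     mid = len(live) // 2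
--     t1, c1 = place(live[:mid], base, size_t)
--     t2, c2 = place(live[mid:], t1, size_t)
--     return t2, merge_cand(c1, c2)
--
-- def greedy_by_longest_and_size_with_smallest_gap(ordered_records):
--     ordered_records.sort(key=lambda x: (x[0][1] - x[0][0]), reverse=True)
--     decisions = []
--     total_consumption = 0
--     for (begin_t, end_t), size_t in ordered_records:
--         live = sorted(
--             ((o, s) for (b, e), (o, s) in decisions
--              if max(e, end_t) - min(b, begin_t) <= (e - b) + (end_t - begin_t)),
--             key=lambda p: p[0])
--         top, best = place(live, 0, size_t)
--         offset = top if best is None else best[1] - best[0]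
--         total_consumption = max(total_consumption, offset + size_t)
--         decisions.append(((begin_t, end_t), (offset, size_t)))
--     return decisions, total_consumption
-- ===== Notes on version B (the rewrite author's own statement) =====
-- stated objective: alternative
-- what changed: A's per-record linear sweep with a running prev/best over a persistently re-sorted allocation list is replaced by a per-record divide-and-conquer: the offset-sorted live blocks are split recursively and each half returns a (stack-top, best fitting (gap, offset) candidate) summary that is merged tournament-style; the outer loop keeps only the decision list.
import Mathlib
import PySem

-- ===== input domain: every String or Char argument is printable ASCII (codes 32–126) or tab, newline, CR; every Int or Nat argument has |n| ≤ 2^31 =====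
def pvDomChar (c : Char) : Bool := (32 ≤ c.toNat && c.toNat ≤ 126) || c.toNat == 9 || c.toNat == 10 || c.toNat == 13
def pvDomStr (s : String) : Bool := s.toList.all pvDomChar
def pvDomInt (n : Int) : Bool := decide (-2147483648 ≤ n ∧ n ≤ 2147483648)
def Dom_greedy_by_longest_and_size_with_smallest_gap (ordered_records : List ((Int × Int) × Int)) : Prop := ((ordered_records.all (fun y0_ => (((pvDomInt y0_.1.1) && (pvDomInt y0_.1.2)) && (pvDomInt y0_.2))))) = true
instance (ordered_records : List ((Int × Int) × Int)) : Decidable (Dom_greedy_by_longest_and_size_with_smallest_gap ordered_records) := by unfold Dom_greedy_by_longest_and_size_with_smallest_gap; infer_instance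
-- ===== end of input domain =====

-- B replaces A's per-record linear sweep (running prev/best over a persistently re-sorted
-- allocation list) by a divide-and-conquer over the offset-sorted live blocks, merging
-- (stack-top, best (gap, offset) candidate) summaries of the two halves; equivalence is about
-- the return value (both Pythons also sort the argument list in place, identically).

-- ===== PORT A =====
def pvIntersect (xs ys : Int × Int) : Int :=
  max xs.2 ys.2 - min xs.1 ys.1 - (xs.2 - xs.1) - (ys.2 - ys.1)

def pvIntersectLvr (xs ys : Int × Int) : Bool := decide (pvIntersect xs ys ≤ 0)

-- one iteration of A's find_smallest_gap loop; state = (best_gap (none = inf), best_offset, prev_offset)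
def pvFindAStep (iv : Int × Int) (size_t : Int)
    (st : Option Int × Option Int × Int) (a : (Int × Int) × (Int × Int)) :
    Option Int × Option Int × Int :=
  if pvIntersectLvr a.1 iv then
    let gap := a.2.1 - st.2.2
    let bb : Option Int × Option Int :=
      if decide (size_t ≤ gap) && (match st.1 with | none => true | some g => decide (gap < g)) then
        (some gap, some st.2.2)
      else (st.1, st.2.1)
    (bb.1, bb.2, max st.2.2 (a.2.1 + a.2.2))
  else st

def pvFindSmallestGap (record : (Int × Int) × Int)
    (ordered_allocs : List ((Int × Int) × (Int × Int))) : Int :=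
  let st := ordered_allocs.foldl (pvFindAStep record.1 record.2) (none, none, 0)
  st.2.1.getD st.2.2

def greedy_by_longest_and_size_with_smallest_gap (ordered_records : List ((Int × Int) × Int)) :
    (List ((Int × Int) × (Int × Int))) × Int :=
  let ordered := PySem.List.sorted ordered_records (fun x => x.1.2 - x.1.1) true
  let st := ordered.foldl
    (fun (st : List ((Int × Int) × (Int × Int)) × List ((Int × Int) × (Int × Int)) × Int) record =>
      let best_offset := pvFindSmallestGap record st.1
      let alloc := (record.1, (best_offset, record.2))
      (PySem.List.sorted (st.1 ++ [alloc]) (fun x => x.2.1) false,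
       st.2.1 ++ [alloc],
       max st.2.2 (best_offset + record.2)))
    ([], [], 0)
  (st.2.1, st.2.2)

-- ===== PORT B =====
-- Source B's merge_cand: lexicographically smaller candidate, ties keep the first
def pvMergeCand (c1 c2 : Option (Int × Int)) : Option (Int × Int) :=
  match c1, c2 with
  | none, _ => c2
  | some a, none => some a
  | some a, some b => if b.1 < a.1 ∨ (b.1 = a.1 ∧ b.2 < a.2) then some b else some a

-- Source B's place: divide and conquer over the offset-sorted live blocks
def pvPlace (size_t : Int) : List (Int × Int) → Int → Int × Option (Int × Int)
  | [], base => (base, none)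
  | [x], base =>
      (max base (x.1 + x.2), if decide (size_t ≤ x.1 - base) then some (x.1 - base, x.1) else none)
  | x :: y :: r, base =>
      let l := x :: y :: r
      let mid := l.length / 2
      let p1 := pvPlace size_t (l.take mid) base
      let p2 := pvPlace size_t (l.drop mid) p1.1
      (p2.1, pvMergeCand p1.2 p2.2)
termination_by l _ => l.length
decreasing_by
  · simp [List.length_take]; omega
  · simp [List.length_drop]; omega

def greedy_by_longest_and_size_with_smallest_gap_alt (ordered_records : List ((Int × Int) × Int)) :
    (List ((Int × Int) × (Int × Int))) × Int :=
  let ordered := PySem.List.sorted ordered_records (fun x => x.1.2 - x.1.1) true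
  ordered.foldl
    (fun (st : List ((Int × Int) × (Int × Int)) × Int) record =>
      let live := PySem.List.sorted
        ((st.1.filter (fun a => decide (max a.1.2 record.1.2 - min a.1.1 record.1.1 ≤
            (a.1.2 - a.1.1) + (record.1.2 - record.1.1)))).map (fun a => a.2))
        (fun p => p.1) false
      let tb := pvPlace record.2 live 0
      let offset := match tb.2 with | none => tb.1 | some b => b.2 - b.1
      (st.1 ++ [(record.1, (offset, record.2))], max st.2 (offset + record.2)))
    ([], 0)

-- ===== PRECONDITION & SPEC =====
def Spec_greedy_by_longest_and_size_with_smallest_gap (ordered_records : List ((Int × Int) × Int)) (out : (List ((Int × Int) × (Int × Int))) × Int) : Prop := out = greedy_by_longest_and_size_with_smallest_gap_alt ordered_records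
instance (ordered_records : List ((Int × Int) × Int)) (out : (List ((Int × Int) × (Int × Int))) × Int) : Decidable (Spec_greedy_by_longest_and_size_with_smallest_gap ordered_records out) := by unfold Spec_greedy_by_longest_and_size_with_smallest_gap; infer_instance

-- ===== CLAIM (what is proved, stated in full; the proofs are below) =====
def Claim_equal_greedy_by_longest_and_size_with_smallest_gap : Prop := ∀ (ordered_records : List ((Int × Int) × Int)), Dom_greedy_by_longest_and_size_with_smallest_gap ordered_records → Spec_greedy_by_longest_and_size_with_smallest_gap ordered_records (greedy_by_longest_and_size_with_smallest_gap ordered_records)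

-- ===== LEMMAS AND PROOFS =====

-- sorted (M ++ [x]) is one insertBy step on sorted M (the foldl characterisation)
theorem pv_sorted_append_singleton {α κ : Type} [LinearOrder κ] (M : List α) (x : α) (key : α → κ) :
    PySem.List.sorted (M ++ [x]) key =
      PySem.List.insertBy (fun a b => decide (key a < key b)) x (PySem.List.sorted M key) := by
  rw [PySem.List.sorted_eq_foldl_insertBy, PySem.List.sorted_eq_foldl_insertBy, List.foldl_append]
  rfl

-- re-sorting an already sorted list with one appended element
theorem pv_resort {α κ : Type} [LinearOrder κ] (M : List α) (x : α) (key : α → κ) :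
    PySem.List.sorted (PySem.List.sorted M key ++ [x]) key =
      PySem.List.sorted (M ++ [x]) key := by
  rw [pv_sorted_append_singleton, pv_sorted_append_singleton, PySem.List.sorted_sorted]

theorem pv_insertBy_of_head_lt {α κ : Type} [LinearOrder κ] (key : α → κ) (x : α) (ys : List α)
    (h : ∀ z ∈ ys, key x < key z) :
    PySem.List.insertBy (fun a b => decide (key a < key b)) x ys = x :: ys := by
  cases ys with
  | nil => rfl
  | cons z zs =>
    show (if decide (key x < key z) = true then x :: z :: zs else _) = _
    rw [if_pos (by simpa using h z (by simp))]

-- filtering commutes with insertBy into a key-sorted list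
theorem pv_filter_insertBy {α κ : Type} [LinearOrder κ] (key : α → κ) (p : α → Bool)
    (x : α) (ys : List α) (hs : ys.Pairwise (fun a b => key a ≤ key b)) :
    (PySem.List.insertBy (fun a b => decide (key a < key b)) x ys).filter p =
      if p x then PySem.List.insertBy (fun a b => decide (key a < key b)) x (ys.filter p)
      else ys.filter p := by
  induction ys with
  | nil => cases hpx : p x <;> simp [PySem.List.insertBy, List.filter, hpx]
  | cons y ys ih =>
    rcases List.pairwise_cons.mp hs with ⟨hy, hys⟩
    by_cases hlt : key x < key y
    · have h1 : PySem.List.insertBy (fun a b => decide (key a < key b)) x (y :: ys)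
          = x :: y :: ys := by
        show (if decide (key x < key y) = true then _ else _) = _
        rw [if_pos (by simpa using hlt)]
      rw [h1]
      cases hpx : p x
      · simp [List.filter_cons, hpx]
      · rw [if_pos rfl, List.filter_cons_of_pos hpx]
        have hall : ∀ z ∈ (y :: ys).filter p, key x < key z := by
          intro z hz
          have hz' := List.mem_of_mem_filter hz
          rcases List.mem_cons.mp hz' with rfl | hz''
          · exact hlt
          · exact lt_of_lt_of_le hlt (hy z hz'')
        rw [pv_insertBy_of_head_lt key x _ hall]
    · have h1 : PySem.List.insertBy (fun a b => decide (key a < key b)) x (y :: ys)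
          = y :: PySem.List.insertBy (fun a b => decide (key a < key b)) x ys := by
        show (if decide (key x < key y) = true then _ else _) = _
        rw [if_neg (by simpa using hlt)]
      rw [h1]
      cases hpy : p y
      · rw [List.filter_cons_of_neg (by simp [hpy]), List.filter_cons_of_neg (by simp [hpy]), ih hys]
      · rw [List.filter_cons_of_pos hpy, List.filter_cons_of_pos hpy, ih hys]
        have h2 : PySem.List.insertBy (fun a b => decide (key a < key b)) x (y :: ys.filter p)
            = y :: PySem.List.insertBy (fun a b => decide (key a < key b)) x (ys.filter p) := by
          show (if decide (key x < key y) = true then _ else _) = _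
          rw [if_neg (by simpa using hlt)]
        cases hpx : p x
        · rfl
        · rw [if_pos rfl, if_pos rfl, h2]

-- filtering commutes with sorting
theorem pv_filter_sorted {α κ : Type} [LinearOrder κ] (key : α → κ) (p : α → Bool) (M : List α) :
    (PySem.List.sorted M key).filter p = PySem.List.sorted (M.filter p) key := by
  induction M using List.reverseRecOn with
  | nil => rfl
  | append_singleton M x ih =>
    rw [pv_sorted_append_singleton,
      pv_filter_insertBy key p x _ (PySem.List.sorted_pairwise M key), List.filter_append]
    cases hpx : p x
    · simpa [List.filter, hpx] using ih
    · rw [if_pos rfl, ih, List.filter_cons_of_pos hpx, List.filter_nil, pv_sorted_append_singleton]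

-- mapping commutes with insertBy when the key factors through the map
theorem pv_map_insertBy {α β κ : Type} [LinearOrder κ] (f : α → β) (key : β → κ)
    (x : α) (ys : List α) :
    (PySem.List.insertBy (fun a b => decide (key (f a) < key (f b))) x ys).map f =
      PySem.List.insertBy (fun a b => decide (key a < key b)) (f x) (ys.map f) := by
  induction ys with
  | nil => rfl
  | cons y ys ih =>
    have h1 : PySem.List.insertBy (fun a b => decide (key (f a) < key (f b))) x (y :: ys)
        = if decide (key (f x) < key (f y)) = true then x :: y :: ys
          else y :: PySem.List.insertBy (fun a b => decide (key (f a) < key (f b))) x ys := rfl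
    have h2 : PySem.List.insertBy (fun a b => decide (key a < key b)) (f x) (f y :: ys.map f)
        = if decide (key (f x) < key (f y)) = true then f x :: f y :: ys.map f
          else f y :: PySem.List.insertBy (fun a b => decide (key a < key b)) (f x) (ys.map f) := rfl
    rw [List.map_cons, h1, h2]
    by_cases h : key (f x) < key (f y)
    · rw [if_pos (by simpa using h), if_pos (by simpa using h)]; rfl
    · rw [if_neg (by simpa using h), if_neg (by simpa using h), List.map_cons, ih]

-- mapping commutes with sorting when the key factors through the map
theorem pv_map_sorted {α β κ : Type} [LinearOrder κ] (f : α → β) (key : β → κ) (M : List α) :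
    (PySem.List.sorted M (fun a => key (f a)) false).map f =
      PySem.List.sorted (M.map f) key false := by
  induction M using List.reverseRecOn with
  | nil => rfl
  | append_singleton M x ih =>
    rw [pv_sorted_append_singleton, pv_map_insertBy, ih,
      show (M ++ [x]).map f = M.map f ++ [f x] by simp, pv_sorted_append_singleton]

-- A's loop body without the overlap guard
def pvFindAStep' (size_t : Int) (st : Option Int × Option Int × Int)
    (a : (Int × Int) × (Int × Int)) : Option Int × Option Int × Int :=
  let gap := a.2.1 - st.2.2
  let bb : Option Int × Option Int :=
    if decide (size_t ≤ gap) && (match st.1 with | none => true | some g => decide (gap < g)) then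
      (some gap, some st.2.2)
    else (st.1, st.2.1)
  (bb.1, bb.2, max st.2.2 (a.2.1 + a.2.2))

-- A's guarded fold = the unguarded fold over the filtered list
theorem pv_foldl_skip (iv : Int × Int) (size_t : Int) (L : List ((Int × Int) × (Int × Int))) :
    ∀ init, L.foldl (pvFindAStep iv size_t) init =
      (L.filter (fun a => pvIntersectLvr a.1 iv)).foldl (pvFindAStep' size_t) init := by
  induction L with
  | nil => intro init; rfl
  | cons a L ih =>
    intro init
    rw [List.foldl_cons]
    cases hg : pvIntersectLvr a.1 iv
    · rw [List.filter_cons_of_neg (by simp [hg])]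
      have h1 : pvFindAStep iv size_t init a = init := by simp [pvFindAStep, hg]
      rw [h1]; exact ih init
    · rw [List.filter_cons_of_pos (by simp [hg]), List.foldl_cons]
      have h1 : pvFindAStep iv size_t init a = pvFindAStep' size_t init a := by
        simp [pvFindAStep, pvFindAStep', hg]
      rw [h1]; exact ih _

-- the sweep data over (offset, size) pairs: gap list, keys (gap, offset), final prev
def pvGaps2 : List (Int × Int) → Int → List (Int × Int)
  | [], _ => []
  | a :: t, p => (a.1 - p, p) :: pvGaps2 t (max p (a.1 + a.2))

def pvKeys : List (Int × Int) → Int → List (Int × Int)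
  | [], _ => []
  | a :: t, p => (a.1 - p, a.1) :: pvKeys t (max p (a.1 + a.2))

def pvPrev2 : List (Int × Int) → Int → Int
  | [], p => p
  | a :: t, p => pvPrev2 t (max p (a.1 + a.2))

-- A's best-gap update seen as a fold over the gap list
def pvSelStep (size_t : Int) (bb : Option Int × Option Int) (g : Int × Int) :
    Option Int × Option Int :=
  if decide (size_t ≤ g.1) && (match bb.1 with | none => true | some mg => decide (g.1 < mg)) then
    (some g.1, some g.2)
  else bb

-- the lexicographic best-candidate update over keys (gap, offset)
def pvLexStep (size_t : Int) (b : Option (Int × Int)) (k : Int × Int) : Option (Int × Int) :=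
  if decide (size_t ≤ k.1) &&
      (match b with | none => true | some bb => decide (k.1 < bb.1 ∨ (k.1 = bb.1 ∧ k.2 < bb.2))) then
    some k
  else b

-- the unguarded fold, split into the gap-list fold and the prev recursion
theorem pv_sweep (size_t : Int) (L : List ((Int × Int) × (Int × Int))) :
    ∀ (bg bo : Option Int) (p : Int),
      L.foldl (pvFindAStep' size_t) (bg, bo, p) =
        (((pvGaps2 (L.map (fun a => a.2)) p).foldl (pvSelStep size_t) (bg, bo)).1,
         ((pvGaps2 (L.map (fun a => a.2)) p).foldl (pvSelStep size_t) (bg, bo)).2,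
         pvPrev2 (L.map (fun a => a.2)) p) := by
  induction L with
  | nil => intro bg bo p; rfl
  | cons a L ih =>
    intro bg bo p
    rw [List.foldl_cons]
    cases hc : (decide (size_t ≤ a.2.1 - p) &&
        (match bg with | none => true | some g => decide (a.2.1 - p < g)))
    · have h1 : pvFindAStep' size_t (bg, bo, p) a = (bg, bo, max p (a.2.1 + a.2.2)) := by
        simp only [pvFindAStep']; rw [if_neg (by simp [hc])]
      have h2 : pvSelStep size_t (bg, bo) (a.2.1 - p, p) = (bg, bo) := by
        simp only [pvSelStep]; rw [if_neg (by simp [hc])]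
      rw [h1, ih]
      simp only [List.map_cons, pvGaps2, pvPrev2, List.foldl_cons, h2]
    · have h1 : pvFindAStep' size_t (bg, bo, p) a
          = (some (a.2.1 - p), some p, max p (a.2.1 + a.2.2)) := by
        simp only [pvFindAStep']; rw [if_pos (by simp [hc])]
      have h2 : pvSelStep size_t (bg, bo) (a.2.1 - p, p) = (some (a.2.1 - p), some p) := by
        simp only [pvSelStep]; rw [if_pos (by simp [hc])]
      rw [h1, ih]
      simp only [List.map_cons, pvGaps2, pvPrev2, List.foldl_cons, h2]

-- merge_cand is associative (left-biased minimum of a linear order on pairs)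
theorem pv_mergeCand_assoc (a b c : Option (Int × Int)) :
    pvMergeCand (pvMergeCand a b) c = pvMergeCand a (pvMergeCand b c) := by
  rcases a with _ | ⟨a1, a2⟩
  · rfl
  rcases b with _ | ⟨b1, b2⟩
  · rfl
  rcases c with _ | ⟨c1, c2⟩
  · simp only [pvMergeCand]; split_ifs <;> rfl
  by_cases h1 : (b1 < a1 ∨ (b1 = a1 ∧ b2 < a2)) <;>
    by_cases h2 : (c1 < b1 ∨ (c1 = b1 ∧ c2 < b2)) <;>
    by_cases h3 : (c1 < a1 ∨ (c1 = a1 ∧ c2 < a2)) <;>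
    simp only [pvMergeCand, h1, h2, h3, if_true, if_false] <;>
    first
      | rfl
      | (simp only [Option.some.injEq, Prod.mk.injEq]; omega)

-- a pvLexStep fold from any start = merge_cand of the start with the fold from none
theorem pv_lexStep_merge (s : Int) (c : Option (Int × Int)) (k : Int × Int) :
    pvLexStep s c k = pvMergeCand c (pvLexStep s none k) := by
  rcases c with _ | ⟨c1, c2⟩
  · rfl
  by_cases h1 : s ≤ k.1 <;>
    by_cases h2 : (k.1 < c1 ∨ (k.1 = c1 ∧ k.2 < c2)) <;>
    simp [pvLexStep, pvMergeCand, h1, h2]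

theorem pv_lex_fold_merge (s : Int) (ks : List (Int × Int)) :
    ∀ c, ks.foldl (pvLexStep s) c = pvMergeCand c (ks.foldl (pvLexStep s) none) := by
  induction ks with
  | nil => intro c; cases c <;> rfl
  | cons k ks ih =>
    intro c
    rw [List.foldl_cons, List.foldl_cons, ih (pvLexStep s c k), ih (pvLexStep s none k),
      pv_lexStep_merge, pv_mergeCand_assoc]

-- keys / prev split over an append
theorem pv_keys_append (l1 l2 : List (Int × Int)) :
    ∀ p, pvKeys (l1 ++ l2) p = pvKeys l1 p ++ pvKeys l2 (pvPrev2 l1 p) := by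
  induction l1 with
  | nil => intro p; rfl
  | cons a t ih => intro p; simp only [List.cons_append, pvKeys, pvPrev2, ih]

theorem pv_prev2_append (l1 l2 : List (Int × Int)) :
    ∀ p, pvPrev2 (l1 ++ l2) p = pvPrev2 l2 (pvPrev2 l1 p) := by
  induction l1 with
  | nil => intro p; rfl
  | cons a t ih => intro p; simp only [List.cons_append, pvPrev2, ih]

-- B's divide and conquer computes the sweep's final prev and the lex-best fitting key
theorem pv_place_spec (s : Int) (l : List (Int × Int)) (base : Int) :
    pvPlace s l base = (pvPrev2 l base, (pvKeys l base).foldl (pvLexStep s) none) := by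
  induction l, base using pvPlace.induct s with
  | case1 base => simp [pvPlace, pvPrev2, pvKeys]
  | case2 x base =>
    simp only [pvPlace, pvPrev2, pvKeys, List.foldl_cons, List.foldl_nil, pvLexStep,
      Bool.and_true]
  | case3 x y r base l mid p1 ih1 ih1' ih2 =>
    clear ih1
    simp only [l, mid, p1] at ih2
    conv_rhs => rw [← List.take_append_drop ((x :: y :: r).length / 2) (x :: y :: r)]
    rw [pv_keys_append, pv_prev2_append, List.foldl_append, pv_lex_fold_merge, pvPlace]
    rw [ih1'] at ih2 ⊢
    rw [ih2]

-- A's strict-first selection over the gap list = the lex-minimum over the keys,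
-- on a list whose offsets are non-decreasing
theorem pv_sel_lex_some (s : Int) (L : List (Int × Int)) :
    ∀ p g0 o0, L.Pairwise (fun a b => a.1 ≤ b.1) → (∀ a ∈ L, o0 ≤ a.1) →
      (pvGaps2 L p).foldl (pvSelStep s) (some g0, some (o0 - g0)) =
        (match (pvKeys L p).foldl (pvLexStep s) (some (g0, o0)) with
         | none => ((none : Option Int), (none : Option Int))
         | some k => (some k.1, some (k.2 - k.1))) := by
  induction L with
  | nil => intro p g0 o0 _ _; rfl
  | cons a t ih =>
    intro p g0 o0 hs ho
    rcases List.pairwise_cons.mp hs with ⟨ha, ht⟩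
    have ho0a : o0 ≤ a.1 := ho a (List.mem_cons_self)
    simp only [pvGaps2, pvKeys, List.foldl_cons]
    have hstep1 : pvSelStep s (some g0, some (o0 - g0)) (a.1 - p, p) =
        if decide (s ≤ a.1 - p) && decide (a.1 - p < g0) then (some (a.1 - p), some p)
        else (some g0, some (o0 - g0)) := rfl
    have hstep2 : pvLexStep s (some (g0, o0)) (a.1 - p, a.1) =
        if decide (s ≤ a.1 - p) && decide (a.1 - p < g0) then some (a.1 - p, a.1)
        else some (g0, o0) := by
      simp only [pvLexStep]
      have : (a.1 - p < g0 ∨ (a.1 - p = g0 ∧ a.1 < o0)) ↔ (a.1 - p < g0) := by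
        constructor
        · rintro (h | ⟨_, h2⟩)
          · exact h
          · exact absurd h2 (not_lt.mpr ho0a)
        · exact Or.inl
      simp only [this]
    rw [hstep1, hstep2]
    by_cases hc : (decide (s ≤ a.1 - p) && decide (a.1 - p < g0)) = true
    · rw [if_pos hc, if_pos hc]
      have hp : p = a.1 - (a.1 - p) := by ring
      calc (pvGaps2 t (max p (a.1 + a.2))).foldl (pvSelStep s) (some (a.1 - p), some p)
          = (pvGaps2 t (max p (a.1 + a.2))).foldl (pvSelStep s)
              (some (a.1 - p), some (a.1 - (a.1 - p))) := by rw [← hp]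
        _ = _ := ih (max p (a.1 + a.2)) (a.1 - p) a.1 ht ha
    · rw [if_neg hc, if_neg hc]
      exact ih (max p (a.1 + a.2)) g0 o0 ht
        (fun b hb => le_trans ho0a (ha b hb))

theorem pv_sel_lex_none (s : Int) (L : List (Int × Int))
    (hs : L.Pairwise (fun a b => a.1 ≤ b.1)) :
    ∀ p, (pvGaps2 L p).foldl (pvSelStep s) (none, none) =
      (match (pvKeys L p).foldl (pvLexStep s) none with
       | none => ((none : Option Int), (none : Option Int))
       | some k => (some k.1, some (k.2 - k.1))) := by
  induction L with
  | nil => intro p; rfl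
  | cons a t ih =>
    intro p
    rcases List.pairwise_cons.mp hs with ⟨ha, ht⟩
    simp only [pvGaps2, pvKeys, List.foldl_cons]
    have hstep1 : pvSelStep s (none, none) (a.1 - p, p) =
        if decide (s ≤ a.1 - p) then (some (a.1 - p), some p) else (none, none) := by
      simp only [pvSelStep, Bool.and_true]
    have hstep2 : pvLexStep s none (a.1 - p, a.1) =
        if decide (s ≤ a.1 - p) then some (a.1 - p, a.1) else none := by
      simp only [pvLexStep, Bool.and_true]
    rw [hstep1, hstep2]
    by_cases hc : (decide (s ≤ a.1 - p)) = true
    · rw [if_pos hc, if_pos hc]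
      have hp : p = a.1 - (a.1 - p) := by ring
      calc (pvGaps2 t (max p (a.1 + a.2))).foldl (pvSelStep s) (some (a.1 - p), some p)
          = (pvGaps2 t (max p (a.1 + a.2))).foldl (pvSelStep s)
              (some (a.1 - p), some (a.1 - (a.1 - p))) := by rw [← hp]
        _ = _ := pv_sel_lex_some s t (max p (a.1 + a.2)) (a.1 - p) a.1 ht ha
    · rw [if_neg hc, if_neg hc]
      exact ih ht (max p (a.1 + a.2))

-- the core: A's sweep over an offset-sorted list vs B's divide-and-conquer on its (offset, size)s
theorem pv_find_core (s : Int) (M : List ((Int × Int) × (Int × Int))) :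
    (let st := (PySem.List.sorted M (fun x => x.2.1) false).foldl (pvFindAStep' s)
        ((none : Option Int), (none : Option Int), (0 : Int))
     st.2.1.getD st.2.2) =
      (let live := (PySem.List.sorted M (fun x => x.2.1) false).map (fun a => a.2)
       let tb := pvPlace s live 0
       match tb.2 with | none => tb.1 | some b => b.2 - b.1) := by
  have hpw : ((PySem.List.sorted M (fun x => x.2.1) false).map (fun a => a.2)).Pairwise
      (fun a b => a.1 ≤ b.1) :=
    List.Pairwise.map _ (fun a b h => h) (PySem.List.sorted_pairwise M (fun x => x.2.1))
  dsimp only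
  rw [pv_sweep, pv_place_spec, pv_sel_lex_none s _ hpw 0]
  rcases hfold : ((pvKeys ((PySem.List.sorted M (fun x => x.2.1) false).map (fun a => a.2))
      0).foldl (pvLexStep s) none) with _ | k
  · simp [hfold]
  · simp [hfold]

-- A's find over the offset-sorted alloc list = B's divide-and-conquer over the raw list
theorem pv_find_eq (record : (Int × Int) × Int) (dec : List ((Int × Int) × (Int × Int))) :
    pvFindSmallestGap record (PySem.List.sorted dec (fun x => x.2.1) false) =
      (let live := PySem.List.sorted
          ((dec.filter (fun a => decide (max a.1.2 record.1.2 - min a.1.1 record.1.1 ≤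
              (a.1.2 - a.1.1) + (record.1.2 - record.1.1)))).map (fun a => a.2))
          (fun p => p.1) false
       let tb := pvPlace record.2 live 0
       match tb.2 with | none => tb.1 | some b => b.2 - b.1) := by
  have hfilter : dec.filter (fun a => decide (max a.1.2 record.1.2 - min a.1.1 record.1.1 ≤
        (a.1.2 - a.1.1) + (record.1.2 - record.1.1)))
      = dec.filter (fun a => pvIntersectLvr a.1 record.1) := by
    refine List.filter_congr (fun a _ => ?_)
    simp only [pvIntersectLvr, pvIntersect]
    rw [decide_eq_decide]
    omega
  have hmap : PySem.List.sorted
        ((dec.filter (fun a => pvIntersectLvr a.1 record.1)).map (fun a => a.2))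
        (fun p => p.1) false
      = (PySem.List.sorted (dec.filter (fun a => pvIntersectLvr a.1 record.1))
          (fun x => x.2.1) false).map (fun a => a.2) :=
    (pv_map_sorted (fun a : (Int × Int) × (Int × Int) => a.2) (fun p : Int × Int => p.1) _).symm
  dsimp only
  rw [hfilter, hmap]
  unfold pvFindSmallestGap
  rw [pv_foldl_skip, pv_filter_sorted]
  exact pv_find_core record.2 (dec.filter (fun a => pvIntersectLvr a.1 record.1))

-- the outer greedy fold: A's triple state vs B's pair state
theorem pv_outer (rs : List ((Int × Int) × Int)) :
    ∀ (dec : List ((Int × Int) × (Int × Int))) (tot : Int),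
      rs.foldl
        (fun (st : List ((Int × Int) × (Int × Int)) × List ((Int × Int) × (Int × Int)) × Int) record =>
          let best_offset := pvFindSmallestGap record st.1
          let alloc := (record.1, (best_offset, record.2))
          (PySem.List.sorted (st.1 ++ [alloc]) (fun x => x.2.1) false,
           st.2.1 ++ [alloc],
           max st.2.2 (best_offset + record.2)))
        (PySem.List.sorted dec (fun x => x.2.1) false, dec, tot) =
      ((PySem.List.sorted
          (rs.foldl
            (fun (st : List ((Int × Int) × (Int × Int)) × Int) record =>
              let live := PySem.List.sorted
                ((st.1.filter (fun a => decide (max a.1.2 record.1.2 - min a.1.1 record.1.1 ≤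
                    (a.1.2 - a.1.1) + (record.1.2 - record.1.1)))).map (fun a => a.2))
                (fun p => p.1) false
              let tb := pvPlace record.2 live 0
              let offset := match tb.2 with | none => tb.1 | some b => b.2 - b.1
              (st.1 ++ [(record.1, (offset, record.2))], max st.2 (offset + record.2)))
            (dec, tot)).1 (fun x => x.2.1) false),
       (rs.foldl
          (fun (st : List ((Int × Int) × (Int × Int)) × Int) record =>
            let live := PySem.List.sorted
              ((st.1.filter (fun a => decide (max a.1.2 record.1.2 - min a.1.1 record.1.1 ≤
                  (a.1.2 - a.1.1) + (record.1.2 - record.1.1)))).map (fun a => a.2))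
              (fun p => p.1) false
            let tb := pvPlace record.2 live 0
            let offset := match tb.2 with | none => tb.1 | some b => b.2 - b.1
            (st.1 ++ [(record.1, (offset, record.2))], max st.2 (offset + record.2)))
          (dec, tot))) := by
  induction rs with
  | nil => intro dec tot; rfl
  | cons r rs ih =>
    intro dec tot
    simp only [List.foldl_cons, pv_find_eq r dec]
    rw [pv_resort]
    exact ih _ _

-- ===== VERDICT (by name: the statement is the Claim_ definition above) =====
theorem greedy_by_longest_and_size_with_smallest_gap_spec : Claim_equal_greedy_by_longest_and_size_with_smallest_gap := by
  intro rs _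
  show greedy_by_longest_and_size_with_smallest_gap rs =
    greedy_by_longest_and_size_with_smallest_gap_alt rs
  unfold greedy_by_longest_and_size_with_smallest_gap greedy_by_longest_and_size_with_smallest_gap_alt
  dsimp only
  have h := pv_outer (PySem.List.sorted rs (fun x => x.1.2 - x.1.1) true) [] 0
  simp only [show PySem.List.sorted ([] : List ((Int × Int) × (Int × Int))) (fun x => x.2.1) false = [] from rfl] at h
  rw [h]
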